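-- pv_equiv track=rewrite | github.com/BIONF/CEPLA | align_process.py | popCovCalc
-- ===== SOURCE A (Python) =====
-- def popCovCalc(epitopPosList,length):
--
--     """
--     Calculates the Population Coverage.
--
--     :param epitopPosList: The filtered epitope data
--     :param length: sequence length
--     :return: Returns the list with population coverage values
--
--     """
--     #populationCov
--     filteredList2 = [(i[0], i[1], i[2]) for i in epitopPosList]
--     popCovlist = [0 for i in range(length)]
--     for i in filteredList2:
--         for j in range(i[0], i[1] + 1):
--             if popCovlist[j - 1] < i[2]:
--                 popCovlist[j - 1] = i[2]
--
--     return popCovlist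
-- ===== SOURCE B (Python) =====
-- def popCovCalc(epitopPosList, length):
--     popCov = [0] * length
--     for s, e, v in sorted(epitopPosList, key=lambda t: t[2]):
--         if v <= 0:
--             continue
--         for p in range(s, e + 1):
--             popCov[p - 1] = v
--     return popCov
-- ===== Notes on version B (the rewrite author's own statement) =====
-- stated objective: alternative
-- what changed: Replaces A's conditional running-max painting (read each cell, overwrite only if the new value is larger) by a painter's algorithm: sort the intervals by value ascending and overwrite each covered cell unconditionally, skipping values <= 0 which can never beat the 0 floor; Pre_ excludes exactly the inputs where A raises IndexError (a nonempty interval reaching below 1-length or above length).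
import Mathlib
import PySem

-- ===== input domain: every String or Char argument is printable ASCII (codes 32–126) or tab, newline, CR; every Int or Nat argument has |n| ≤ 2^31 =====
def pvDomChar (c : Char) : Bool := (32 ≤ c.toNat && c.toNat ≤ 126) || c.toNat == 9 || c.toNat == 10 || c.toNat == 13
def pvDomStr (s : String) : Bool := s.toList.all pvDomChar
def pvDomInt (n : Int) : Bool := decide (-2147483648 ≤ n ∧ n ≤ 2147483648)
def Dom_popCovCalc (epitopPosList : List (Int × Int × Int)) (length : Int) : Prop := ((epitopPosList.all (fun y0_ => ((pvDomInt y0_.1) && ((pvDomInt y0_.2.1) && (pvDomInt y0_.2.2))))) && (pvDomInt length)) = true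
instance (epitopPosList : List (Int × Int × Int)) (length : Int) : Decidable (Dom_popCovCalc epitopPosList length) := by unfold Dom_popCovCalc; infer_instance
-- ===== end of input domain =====

-- B replaces A's conditional running-max painting by a painter's algorithm: sort the
-- intervals by value ascending and overwrite unconditionally, skipping values ≤ 0
-- (objective: alternative decomposition, same asymptotic cost).


-- ===== PORT A =====
-- literal transliteration of A; popCovlist[j-1] read/write is ported with pyGetD/pySetD
-- (Python's index semantics, negative indices included), exact under Pre_ (every
-- accessed index is then in Python's valid range)
def popCovCalc (epitopPosList : List (Int × Int × Int)) (length : Int) : List Int :=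
  let filteredList2 := epitopPosList.map (fun i => (i.1, i.2.1, i.2.2))
  let popCovlist : List Int := (PySem.List.pyRange 0 length 1).map (fun _ => (0 : Int))
  filteredList2.foldl (fun acc i =>
    (PySem.List.pyRange i.1 (i.2.1 + 1) 1).foldl (fun acc2 j =>
      if PySem.List.pyGetD acc2 (j - 1) 0 < i.2.2 then PySem.List.pySetD acc2 (j - 1) i.2.2
      else acc2) acc) popCovlist

-- ===== PORT B =====
-- port of Source B: [0] * length, then for each interval in value-ascending sorted order
-- (skipping values ≤ 0) write the value unconditionally at each covered position
def popCovCalc_alt (epitopPosList : List (Int × Int × Int)) (length : Int) : List Int :=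
  let popCov : List Int := PySem.List.pyRepeat [(0 : Int)] length
  (PySem.List.sorted epitopPosList (fun t => t.2.2)).foldl (fun acc t =>
    if t.2.2 ≤ 0 then acc
    else (PySem.List.pyRange t.1 (t.2.1 + 1) 1).foldl (fun acc2 p =>
      PySem.List.pySetD acc2 (p - 1) t.2.2) acc) popCov

-- ===== PRECONDITION & SPEC =====
-- Pre_ excludes exactly the inputs on which A raises IndexError: a nonempty interval
-- reaching a position below 1 - length or above length (in particular any nonempty
-- interval when length < 0, where the coverage list is empty).
def Pre_popCovCalc (epitopPosList : List (Int × Int × Int)) (length : Int) : Prop :=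
  ∀ t ∈ epitopPosList, t.1 ≤ t.2.1 → (1 - length ≤ t.1 ∧ t.2.1 ≤ length)
instance (epitopPosList : List (Int × Int × Int)) (length : Int) : Decidable (Pre_popCovCalc epitopPosList length) := by unfold Pre_popCovCalc; infer_instance
def pvWitness_popCovCalc : (List (Int × Int × Int)) × Int := ([(1, 2, 3), (2, 3, 1)], 3)

def Spec_popCovCalc (epitopPosList : List (Int × Int × Int)) (length : Int) (out : List Int) : Prop := out = popCovCalc_alt epitopPosList length
instance (epitopPosList : List (Int × Int × Int)) (length : Int) (out : List Int) : Decidable (Spec_popCovCalc epitopPosList length out) := by unfold Spec_popCovCalc; infer_instance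

-- ===== CLAIM (what is proved, stated in full; the proofs are below) =====
def Claim_equal_popCovCalc : Prop := ∀ (epitopPosList : List (Int × Int × Int)) (length : Int), Dom_popCovCalc epitopPosList length → Pre_popCovCalc epitopPosList length → Spec_popCovCalc epitopPosList length (popCovCalc epitopPosList length)

-- ===== LEMMAS AND PROOFS =====

-- 0-based cell k (of a list of length n) is covered by interval t, through a direct
-- position j = k+1 or through a negative Python index, i.e. position j = k+1-n
abbrev covers (n k : Nat) (t : Int × Int × Int) : Prop :=
  (t.1 ≤ (k : Int) + 1 ∧ (k : Int) + 1 ≤ t.2.1) ∨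
  (t.1 ≤ (k : Int) + 1 - (n : Int) ∧ (k : Int) + 1 - (n : Int) ≤ t.2.1)

-- the per-interval effect of A on the value at cell k
def maxStep (n k : Nat) (cur : Int) (t : Int × Int × Int) : Int :=
  if covers n k t then max cur t.2.2 else cur

-- the per-interval effect of B on the value at cell k
def wrStep (n k : Nat) (cur : Int) (t : Int × Int × Int) : Int :=
  if 0 < t.2.2 ∧ covers n k t then t.2.2 else cur

-- A's effect with the value-≤-0 intervals gated out (the meeting point of A and B)
def gStep (n k : Nat) (cur : Int) (t : Int × Int × Int) : Int :=
  if 0 < t.2.2 ∧ covers n k t then max cur t.2.2 else cur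

-- PySem.List.pySetD at a negative in-range index (no such bridge lemma is in the prelude)
theorem pySetD_neg {α : Type} (xs : List α) (v : α) (i : Int)
    (h1 : -(xs.length : Int) ≤ i) (h2 : i < 0) :
    PySem.List.pySetD xs i v = xs.set (xs.length - (-i).toNat) v := by
  simp only [PySem.List.pySetD, PySem.List.pySet?, PySem.List.pyIdx?]
  rw [if_neg (by omega), if_pos (by omega)]
  rfl

-- PySem.List.pyGetD at a negative in-range index, via pyGet?_neg_natCast
theorem pyGetD_neg {α : Type} (xs : List α) (d : α) (i : Int)
    (h1 : -(xs.length : Int) ≤ i) (h2 : i < 0) :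
    PySem.List.pyGetD xs i d = xs.getD (xs.length - (-i).toNat) d := by
  obtain ⟨j, hj⟩ : ∃ j : Nat, i = -((j : Nat) : Int) := ⟨(-i).toNat, by omega⟩
  subst hj
  rw [PySem.List.pyGetD, PySem.List.pyGet?_neg_natCast xs j (by omega) (by omega),
    List.getD_eq_getElem?_getD]
  congr 2
  omega

-- the 0-based cell an in-range Python index i addresses
def cellOf (n : Nat) (i : Int) : Nat := if 0 ≤ i then i.toNat else n - (-i).toNat

theorem pySetD_cell {α : Type} (xs : List α) (v : α) (i : Int)
    (h1 : -(xs.length : Int) ≤ i) (_h2 : i < (xs.length : Int)) :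
    PySem.List.pySetD xs i v = xs.set (cellOf xs.length i) v := by
  unfold cellOf
  split_ifs with h0
  · rw [PySem.List.pySetD_of_nonneg xs v h0]
  · exact pySetD_neg xs v i h1 (by omega)

theorem pyGetD_cell {α : Type} (xs : List α) (d : α) (i : Int)
    (h1 : -(xs.length : Int) ≤ i) (_h2 : i < (xs.length : Int)) :
    PySem.List.pyGetD xs i d = xs.getD (cellOf xs.length i) d := by
  unfold cellOf
  split_ifs with h0
  · rw [PySem.List.pyGetD_of_nonneg xs d h0]
  · exact pyGetD_neg xs d i h1 (by omega)

-- A's inner loop over range(s, b): on cells hit by the range (directly or by a negative index),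
-- the running max with v; elsewhere unchanged
theorem innerA_get (v : Int) : ∀ (m : Nat) (s b : Int) (acc : List Int),
    (b - s).toNat = m → 1 - (acc.length : Int) ≤ s → b ≤ (acc.length : Int) + 1 →
    ((PySem.List.pyRange s b 1).foldl (fun acc2 j =>
        if PySem.List.pyGetD acc2 (j - 1) 0 < v then PySem.List.pySetD acc2 (j - 1) v
        else acc2) acc).length = acc.length ∧
    ∀ k : Nat, k < acc.length → ((PySem.List.pyRange s b 1).foldl (fun acc2 j =>
        if PySem.List.pyGetD acc2 (j - 1) 0 < v then PySem.List.pySetD acc2 (j - 1) v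
        else acc2) acc)[k]? =
      if (s ≤ (k : Int) + 1 ∧ (k : Int) + 1 < b) ∨
         (s ≤ (k : Int) + 1 - (acc.length : Int) ∧ (k : Int) + 1 - (acc.length : Int) < b)
      then (acc[k]?).map (fun x => max x v) else acc[k]? := by
  intro m
  induction m with
  | zero =>
    intro s b acc h0 hs hb
    rw [PySem.List.pyRange_one_eq_nil (by omega)]
    exact ⟨rfl, fun k hk => by rw [List.foldl_nil, if_neg (by omega)]⟩
  | succ m ih =>
    intro s b acc h0 hs hb
    have hsb : s < b := by omega
    rw [PySem.List.pyRange_one_cons hsb, List.foldl_cons]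
    have hi1 : -(acc.length : Int) ≤ s - 1 := by omega
    have hi2 : s - 1 < (acc.length : Int) := by omega
    set i := cellOf acc.length (s - 1) with hidef
    have hi : i < acc.length := by
      rw [hidef]; unfold cellOf; split_ifs <;> omega
    have hiff : ∀ k : Nat, k < acc.length →
        (k = i ↔ ((k : Int) + 1 = s ∨ (k : Int) + 1 - (acc.length : Int) = s)) := by
      intro k hk
      rw [hidef]; unfold cellOf; split_ifs <;> omega
    have hstep : (if PySem.List.pyGetD acc (s - 1) 0 < v then PySem.List.pySetD acc (s - 1) v
        else acc) = if acc.getD i 0 < v then acc.set i v else acc := by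
      rw [pyGetD_cell acc 0 (s - 1) hi1 hi2, pySetD_cell acc v (s - 1) hi1 hi2]
    rw [hstep]
    set acc' := if acc.getD i 0 < v then acc.set i v else acc with hacc'
    have hlen' : acc'.length = acc.length := by
      rw [hacc']; split <;> simp
    have hget' : ∀ k : Nat, k < acc.length → acc'[k]? =
        if k = i then (acc[k]?).map (fun x => max x v) else acc[k]? := by
      intro k hk
      rw [hacc']
      by_cases hki : k = i
      · subst hki
        rw [if_pos rfl, List.getD_eq_getElem?_getD, List.getElem?_eq_getElem hk,
          Option.getD_some, Option.map_some]
        split_ifs with hlt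
        · rw [List.getElem?_set, if_pos rfl, if_pos hk, max_eq_right (le_of_lt hlt)]
        · rw [List.getElem?_eq_getElem hk, max_eq_left (not_lt.mp hlt)]
      · rw [if_neg hki]
        split
        · rw [List.getElem?_set, if_neg (fun h => hki h.symm)]
        · rfl
    obtain ⟨ihl, ihg⟩ := ih (s + 1) b acc' (by omega) (by omega) (by omega)
    rw [hlen'] at ihg
    refine ⟨by rw [ihl, hlen'], fun k hk => ?_⟩
    rw [ihg k hk, hget' k hk]
    have hif := (hiff k hk)
    by_cases hki : k = i
    · have h1 := hif.mp hki
      rw [if_pos hki]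
      split_ifs with hA hB hB
      · cases acc[k]? with
        | none => rfl
        | some x => simp [max_comm]
      · omega
      · rfl
      · omega
    · have h1 : ¬ ((k : Int) + 1 = s ∨ (k : Int) + 1 - (acc.length : Int) = s) :=
        fun h => hki (hif.mpr h)
      rw [if_neg hki]
      split_ifs <;> first | rfl | omega

-- B's inner loop over range(s, b): on cells hit by the range, the value v; elsewhere
-- unchanged
theorem innerB_get (v : Int) : ∀ (m : Nat) (s b : Int) (acc : List Int),
    (b - s).toNat = m → 1 - (acc.length : Int) ≤ s → b ≤ (acc.length : Int) + 1 →
    ((PySem.List.pyRange s b 1).foldl (fun acc2 p =>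
        PySem.List.pySetD acc2 (p - 1) v) acc).length = acc.length ∧
    ∀ k : Nat, k < acc.length → ((PySem.List.pyRange s b 1).foldl (fun acc2 p =>
        PySem.List.pySetD acc2 (p - 1) v) acc)[k]? =
      if (s ≤ (k : Int) + 1 ∧ (k : Int) + 1 < b) ∨
         (s ≤ (k : Int) + 1 - (acc.length : Int) ∧ (k : Int) + 1 - (acc.length : Int) < b)
      then (acc[k]?).map (fun _ => v) else acc[k]? := by
  intro m
  induction m with
  | zero =>
    intro s b acc h0 hs hb
    rw [PySem.List.pyRange_one_eq_nil (by omega)]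
    exact ⟨rfl, fun k hk => by rw [List.foldl_nil, if_neg (by omega)]⟩
  | succ m ih =>
    intro s b acc h0 hs hb
    have hsb : s < b := by omega
    rw [PySem.List.pyRange_one_cons hsb, List.foldl_cons]
    have hi1 : -(acc.length : Int) ≤ s - 1 := by omega
    have hi2 : s - 1 < (acc.length : Int) := by omega
    rw [pySetD_cell acc v (s - 1) hi1 hi2]
    set i := cellOf acc.length (s - 1) with hidef
    have hi : i < acc.length := by
      rw [hidef]; unfold cellOf; split_ifs <;> omega
    have hiff : ∀ k : Nat, k < acc.length →
        (k = i ↔ ((k : Int) + 1 = s ∨ (k : Int) + 1 - (acc.length : Int) = s)) := by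
      intro k hk
      rw [hidef]; unfold cellOf; split_ifs <;> omega
    have hget' : ∀ k : Nat, k < acc.length → (acc.set i v)[k]? =
        if k = i then (acc[k]?).map (fun _ => v) else acc[k]? := by
      intro k hk
      rw [List.getElem?_set]
      by_cases hki : k = i
      · rw [if_pos (hki.symm), if_pos hki, if_pos (hki ▸ hk),
          List.getElem?_eq_getElem hk, Option.map_some]
      · rw [if_neg (fun h => hki h.symm), if_neg hki]
    obtain ⟨ihl, ihg⟩ := ih (s + 1) b (acc.set i v) (by omega) (by simp; omega)
      (by simp; omega)
    rw [List.length_set] at ihl ihg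
    refine ⟨ihl, fun k hk => ?_⟩
    rw [ihg k hk, hget' k hk]
    have hif := (hiff k hk)
    by_cases hki : k = i
    · have h1 := hif.mp hki
      rw [if_pos hki]
      split_ifs with hA hB hB
      · cases acc[k]? with
        | none => rfl
        | some x => rfl
      · omega
      · rfl
      · omega
    · have h1 : ¬ ((k : Int) + 1 = s ∨ (k : Int) + 1 - (acc.length : Int) = s) :=
        fun h => hki (hif.mpr h)
      rw [if_neg hki]
      split_ifs <;> first | rfl | omega

-- A's outer loop, pointwise: each cell folds maxStep over the interval list
theorem outerA_get : ∀ (l : List (Int × Int × Int)) (acc : List Int),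
    (∀ t ∈ l, t.1 ≤ t.2.1 → 1 - (acc.length : Int) ≤ t.1 ∧ t.2.1 ≤ (acc.length : Int)) →
    (l.foldl (fun acc2 i =>
        (PySem.List.pyRange i.1 (i.2.1 + 1) 1).foldl (fun acc3 j =>
          if PySem.List.pyGetD acc3 (j - 1) 0 < i.2.2 then PySem.List.pySetD acc3 (j - 1) i.2.2
          else acc3) acc2) acc).length = acc.length ∧
    ∀ k : Nat, k < acc.length → (l.foldl (fun acc2 i =>
        (PySem.List.pyRange i.1 (i.2.1 + 1) 1).foldl (fun acc3 j =>
          if PySem.List.pyGetD acc3 (j - 1) 0 < i.2.2 then PySem.List.pySetD acc3 (j - 1) i.2.2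
          else acc3) acc2) acc)[k]? =
      (acc[k]?).map (fun x => l.foldl (maxStep acc.length k) x) := by
  intro l
  induction l with
  | nil =>
    intro acc _
    refine ⟨rfl, fun k hk => ?_⟩
    rw [List.foldl_nil, List.getElem?_eq_getElem hk, Option.map_some, List.foldl_nil]
  | cons t l ih =>
    intro acc hb
    rw [List.foldl_cons]
    set acc1 := (PySem.List.pyRange t.1 (t.2.1 + 1) 1).foldl (fun acc3 j =>
      if PySem.List.pyGetD acc3 (j - 1) 0 < t.2.2 then PySem.List.pySetD acc3 (j - 1) t.2.2
      else acc3) acc with hacc1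
    have key : acc1.length = acc.length ∧
        ∀ k : Nat, k < acc.length → acc1[k]? = (acc[k]?).map (fun x => maxStep acc.length k x t) := by
      by_cases hne : t.1 ≤ t.2.1
      · obtain ⟨h1, h2⟩ := hb t (by simp) hne
        obtain ⟨hl, hg⟩ := innerA_get t.2.2 ((t.2.1 + 1) - t.1).toNat t.1 (t.2.1 + 1) acc
          rfl (by omega) (by omega)
        refine ⟨hl, fun k hk => ?_⟩
        rw [hg k hk]
        simp only [maxStep, covers]
        by_cases hc : (t.1 ≤ (k : Int) + 1 ∧ (k : Int) + 1 ≤ t.2.1) ∨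
            (t.1 ≤ (k : Int) + 1 - (acc.length : Int) ∧ (k : Int) + 1 - (acc.length : Int) ≤ t.2.1)
        · rw [if_pos (by omega)]
          simp only [if_pos hc]
        · rw [if_neg (by omega)]
          simp only [if_neg hc, Option.map_id']
      · rw [hacc1, PySem.List.pyRange_one_eq_nil (by omega)]
        refine ⟨rfl, fun k hk => ?_⟩
        rw [List.foldl_nil]
        simp only [maxStep, covers]
        cases hx : acc[k]? with
        | none => rfl
        | some x => rw [Option.map_some, if_neg (by omega)]
    obtain ⟨klen, kget⟩ := key
    obtain ⟨ihl, ihg⟩ := ih acc1 (by rw [klen]; intro u hu h; exact hb u (by simp [hu]) h)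
    rw [klen] at ihg
    refine ⟨by rw [ihl, klen], fun k hk => ?_⟩
    rw [ihg k hk, kget k hk, Option.map_map, ← klen]
    simp only [List.foldl_cons, klen]
    rfl

-- B's outer loop, pointwise: each cell folds wrStep over the (sorted) interval list
theorem outerB_get : ∀ (l : List (Int × Int × Int)) (acc : List Int),
    (∀ t ∈ l, t.1 ≤ t.2.1 → 0 < t.2.2 → 1 - (acc.length : Int) ≤ t.1 ∧ t.2.1 ≤ (acc.length : Int)) →
    (l.foldl (fun acc2 t =>
        if t.2.2 ≤ 0 then acc2
        else (PySem.List.pyRange t.1 (t.2.1 + 1) 1).foldl (fun acc3 p =>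
          PySem.List.pySetD acc3 (p - 1) t.2.2) acc2) acc).length = acc.length ∧
    ∀ k : Nat, k < acc.length → (l.foldl (fun acc2 t =>
        if t.2.2 ≤ 0 then acc2
        else (PySem.List.pyRange t.1 (t.2.1 + 1) 1).foldl (fun acc3 p =>
          PySem.List.pySetD acc3 (p - 1) t.2.2) acc2) acc)[k]? =
      (acc[k]?).map (fun x => l.foldl (wrStep acc.length k) x) := by
  intro l
  induction l with
  | nil =>
    intro acc _
    refine ⟨rfl, fun k hk => ?_⟩
    rw [List.foldl_nil, List.getElem?_eq_getElem hk, Option.map_some, List.foldl_nil]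
  | cons t l ih =>
    intro acc hb
    rw [List.foldl_cons]
    set acc1 := if t.2.2 ≤ 0 then acc
      else (PySem.List.pyRange t.1 (t.2.1 + 1) 1).foldl (fun acc3 p =>
        PySem.List.pySetD acc3 (p - 1) t.2.2) acc with hacc1
    have key : acc1.length = acc.length ∧
        ∀ k : Nat, k < acc.length → acc1[k]? = (acc[k]?).map (fun x => wrStep acc.length k x t) := by
      by_cases hv : t.2.2 ≤ 0
      · rw [hacc1, if_pos hv]
        refine ⟨rfl, fun k hk => ?_⟩
        simp only [wrStep]
        cases hx : acc[k]? with
        | none => rfl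
        | some x =>
          rw [Option.map_some, if_neg (fun hcon => absurd hcon.1 (by omega))]
      · rw [hacc1, if_neg hv]
        by_cases hne : t.1 ≤ t.2.1
        · obtain ⟨h1, h2⟩ := hb t (by simp) hne (by omega)
          obtain ⟨hl, hg⟩ := innerB_get t.2.2 ((t.2.1 + 1) - t.1).toNat t.1 (t.2.1 + 1) acc
            rfl (by omega) (by omega)
          refine ⟨hl, fun k hk => ?_⟩
          rw [hg k hk]
          simp only [wrStep, covers]
          by_cases hc : (t.1 ≤ (k : Int) + 1 ∧ (k : Int) + 1 ≤ t.2.1) ∨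
              (t.1 ≤ (k : Int) + 1 - (acc.length : Int) ∧ (k : Int) + 1 - (acc.length : Int) ≤ t.2.1)
          · rw [if_pos (by omega)]
            simp only [if_pos (And.intro (by omega : (0 : Int) < t.2.2) hc)]
          · rw [if_neg (by omega)]
            have hnc : ¬ ((0 : Int) < t.2.2 ∧
                ((t.1 ≤ (k : Int) + 1 ∧ (k : Int) + 1 ≤ t.2.1) ∨
                 (t.1 ≤ (k : Int) + 1 - (acc.length : Int) ∧
                  (k : Int) + 1 - (acc.length : Int) ≤ t.2.1))) := fun h => hc h.2
            simp only [if_neg hnc, Option.map_id']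
        · rw [PySem.List.pyRange_one_eq_nil (by omega)]
          refine ⟨rfl, fun k hk => ?_⟩
          rw [List.foldl_nil]
          simp only [wrStep, covers]
          cases hx : acc[k]? with
          | none => rfl
          | some x => rw [Option.map_some, if_neg (by omega)]
    obtain ⟨klen, kget⟩ := key
    obtain ⟨ihl, ihg⟩ := ih acc1 (by rw [klen]; intro u hu h h'; exact hb u (by simp [hu]) h h')
    rw [klen] at ihg
    refine ⟨by rw [ihl, klen], fun k hk => ?_⟩
    rw [ihg k hk, kget k hk, Option.map_map, ← klen]
    simp only [List.foldl_cons, klen]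
    rfl

-- starting from a non-negative value, intervals with value ≤ 0 never change the running
-- max: maxStep may be gated on 0 < value
theorem foldl_maxStep_eq_gStep (n k : Nat) : ∀ (l : List (Int × Int × Int)) (a : Int),
    0 ≤ a → l.foldl (maxStep n k) a = l.foldl (gStep n k) a := by
  intro l
  induction l with
  | nil => intro a _; rfl
  | cons t l ih =>
    intro a ha
    rw [List.foldl_cons, List.foldl_cons]
    have hstep : maxStep n k a t = gStep n k a t := by
      simp only [maxStep, gStep]
      split_ifs <;> first | rfl | omega
    rw [hstep]
    apply ih
    simp only [gStep]
    split
    · exact le_trans ha (le_max_left _ _)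
    · exact ha

-- on a list sorted by value ascending, B's unconditional overwrite computes the same
-- running max as gStep (each write is at least the current value)
theorem foldl_wrStep_eq_gStep (n k : Nat) : ∀ (l : List (Int × Int × Int)) (a : Int),
    l.Pairwise (fun x y => x.2.2 ≤ y.2.2) → 0 ≤ a →
    (∀ t ∈ l, 0 < t.2.2 ∧ covers n k t → a ≤ t.2.2) →
    l.foldl (wrStep n k) a = l.foldl (gStep n k) a := by
  intro l
  induction l with
  | nil => intro a _ _ _; rfl
  | cons t l ih =>
    intro a hp ha hle
    obtain ⟨hhead, htail⟩ := List.pairwise_cons.mp hp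
    rw [List.foldl_cons, List.foldl_cons]
    by_cases hc : 0 < t.2.2 ∧ covers n k t
    · have hav : a ≤ t.2.2 := hle t (by simp) hc
      have hstep : wrStep n k a t = t.2.2 := by simp only [wrStep]; rw [if_pos hc]
      have hstep' : gStep n k a t = t.2.2 := by
        simp only [gStep]; rw [if_pos hc, max_eq_right hav]
      rw [hstep, hstep']
      exact ih t.2.2 htail (by omega) (fun u hu hcu => hhead u hu)
    · have hstep : wrStep n k a t = a := by simp only [wrStep]; rw [if_neg hc]
      have hstep' : gStep n k a t = a := by simp only [gStep]; rw [if_neg hc]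
      rw [hstep, hstep']
      exact ih a htail ha (fun u hu hcu => hle u (by simp [hu]) hcu)

-- the gated running max is order-independent (so sorting does not change it)
theorem foldl_gStep_perm (n k : Nat) {l₁ l₂ : List (Int × Int × Int)}
    (h : l₁.Perm l₂) (a : Int) :
    l₁.foldl (gStep n k) a = l₂.foldl (gStep n k) a := by
  have hrw : ∀ (m : List (Int × Int × Int)) (b : Int), m.foldl (gStep n k) b =
      ((m.filter (fun t => decide (0 < t.2.2 ∧ covers n k t))).map (fun t => t.2.2)).foldl max b := by
    intro m b
    rw [List.foldl_map,
      ← PySem.List.foldl_ite_eq_foldl_filter (p := fun t => 0 < t.2.2 ∧ covers n k t)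
        (f := fun (cur : Int) (t : Int × Int × Int) => max cur t.2.2)]
    rfl
  rw [hrw, hrw]
  exact List.Perm.foldl_eq
    (rcomm := ⟨fun b a₁ a₂ => by rw [max_right_comm]⟩)
    (((h.filter _).map _)) a

-- ===== VERDICT (by name: the statement is the Claim_ definition above) =====
theorem popCovCalc_spec : Claim_equal_popCovCalc := by
  intro l L _ hPre
  unfold Spec_popCovCalc popCovCalc popCovCalc_alt
  simp only []
  have hmap : l.map (fun (i : Int × Int × Int) => (i.1, i.2.1, i.2.2)) = l := by simp
  rw [hmap, PySem.List.pyRepeat_singleton]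
  set accA : List Int := (PySem.List.pyRange 0 L 1).map (fun _ => (0 : Int)) with haccA
  have hlenA : accA.length = L.toNat := by
    rw [haccA, List.length_map, PySem.List.length_pyRange_one]; omega
  have hgetA : ∀ k : Nat, accA[k]? = if k < L.toNat then some (0 : Int) else none := by
    intro k
    rw [haccA, List.getElem?_map, PySem.List.getElem?_pyRange_one]
    split_ifs with h1 h2 h2 <;> first | rfl | omega
  have hb : ∀ t ∈ l, t.1 ≤ t.2.1 → 1 - (accA.length : Int) ≤ t.1 ∧ t.2.1 ≤ (accA.length : Int) := by
    intro t ht h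
    obtain ⟨h1, h2⟩ := hPre t ht h
    have hL : 1 ≤ L := by omega
    rw [hlenA]; omega
  obtain ⟨hlA, hgA⟩ := outerA_get l accA hb
  set m := PySem.List.sorted l (fun t => t.2.2) with hm
  have hperm : m.Perm l := PySem.List.sorted_perm l (fun t => t.2.2) false
  have hbB : ∀ t ∈ m, t.1 ≤ t.2.1 → 0 < t.2.2 →
      1 - ((List.replicate L.toNat (0 : Int)).length : Int) ≤ t.1 ∧
      t.2.1 ≤ ((List.replicate L.toNat (0 : Int)).length : Int) := by
    intro t ht h _
    have := hb t (hperm.mem_iff.mp ht) h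
    rw [List.length_replicate]
    rw [hlenA] at this
    exact this
  obtain ⟨hlB, hgB⟩ := outerB_get m (List.replicate L.toNat (0 : Int)) hbB
  rw [List.length_replicate] at hgB
  apply List.ext_getElem?
  intro k
  by_cases hk : k < L.toNat
  · rw [hgA k (by omega), hgB k hk, hgetA k, if_pos hk,
      List.getElem?_eq_getElem (by simpa using hk), List.getElem_replicate,
      Option.map_some, Option.map_some, hlenA]
    congr 1
    rw [foldl_maxStep_eq_gStep L.toNat k l 0 (le_refl 0),
      ← foldl_gStep_perm L.toNat k hperm 0,
      foldl_wrStep_eq_gStep L.toNat k m 0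
        (PySem.List.sorted_pairwise l (fun t => t.2.2)) (le_refl 0)
        (fun t _ hc => le_of_lt hc.1)]
  · have h1 : (l.foldl (fun acc2 i =>
        (PySem.List.pyRange i.1 (i.2.1 + 1) 1).foldl (fun acc3 j =>
          if PySem.List.pyGetD acc3 (j - 1) 0 < i.2.2 then PySem.List.pySetD acc3 (j - 1) i.2.2
          else acc3) acc2) accA).length = L.toNat := by rw [hlA, hlenA]
    have h2 : (m.foldl (fun acc2 t =>
        if t.2.2 ≤ 0 then acc2
        else (PySem.List.pyRange t.1 (t.2.1 + 1) 1).foldl (fun acc3 p =>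
          PySem.List.pySetD acc3 (p - 1) t.2.2) acc2) (List.replicate L.toNat (0 : Int))).length
        = L.toNat := by rw [hlB, List.length_replicate]
    rw [List.getElem?_eq_none (by omega), List.getElem?_eq_none (by omega)]
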